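-- pv_equiv track=rewrite | github.com/bhattlab/durrant | mustache/src/mod/findsites/peakAnalyzer.py | calc_peak_pairs_single
-- ===== SOURCE A (Python) =====
-- def calc_peak_pairs_single(forward_peaks, reverse_peaks):
--     merged_peaks = sorted(forward_peaks + reverse_peaks)
--     peak_pairs = []
--
--     p = 0
--     while p+1 < len(merged_peaks):
--         if merged_peaks[p] in forward_peaks and merged_peaks[p+1] in reverse_peaks:
--             peak_pairs.append((merged_peaks[p], merged_peaks[p+1]))
--             p += 2
--         else:
--             p += 1
--     return peak_pairs
-- ===== SOURCE B (Python) =====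
-- def calc_peak_pairs_single(forward_peaks, reverse_peaks):
--     merged = sorted(forward_peaks + reverse_peaks)
--     fwd = set(forward_peaks)
--     rev = set(reverse_peaks)
--     # cond[i]: position i could start a pair
--     cond = [a in fwd and b in rev for a, b in zip(merged, merged[1:])]
--     pairs = []
--     i = 0
--     n = len(cond)
--     while i < n:
--         if cond[i]:
--             j = i
--             while j < n and cond[j]:
--                 j += 1
--             # maximal run [i, j) of pairable positions: pairs start at every other index
--             pairs += [(merged[k], merged[k + 1]) for k in range(i, j, 2)]
--             i = j
--         else:
--             i += 1
--     return pairs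
-- ===== Notes on version B (the rewrite author's own statement) =====
-- stated objective: faster
-- what changed: Instead of A's single greedy index-walk with lookahead and p+=2/p+=1 jumps, B stages the work: it precomputes a boolean pairability list cond[i] = merged[i] in forward and merged[i+1] in reverse (with set-based membership), then finds each maximal run of true positions and emits the pairs at every other index of the run; the alternation-within-runs characterisation replaces the greedy skip logic.
import Mathlib
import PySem

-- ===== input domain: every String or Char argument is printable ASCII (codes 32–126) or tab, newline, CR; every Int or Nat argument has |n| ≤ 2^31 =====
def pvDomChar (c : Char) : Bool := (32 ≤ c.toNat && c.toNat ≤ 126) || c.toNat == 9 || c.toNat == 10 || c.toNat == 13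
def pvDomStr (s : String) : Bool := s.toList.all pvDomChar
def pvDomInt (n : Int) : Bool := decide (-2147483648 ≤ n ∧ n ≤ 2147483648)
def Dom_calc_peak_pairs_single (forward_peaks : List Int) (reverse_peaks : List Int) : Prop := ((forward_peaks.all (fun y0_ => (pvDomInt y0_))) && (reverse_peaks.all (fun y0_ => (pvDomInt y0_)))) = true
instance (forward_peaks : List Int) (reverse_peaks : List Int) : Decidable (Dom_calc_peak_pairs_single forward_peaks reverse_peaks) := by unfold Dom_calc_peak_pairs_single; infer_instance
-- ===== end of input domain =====

-- B replaces A's index-with-lookahead greedy loop by staged passes: precompute the boolean pairability list cond, then emit every-other pair inside each maximal run of true positions; set-based membership makes B measurably faster. Objective: faster.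


-- ===== PORT A =====
-- A's while-loop: index p walks the merged sorted list; pair (m[p], m[p+1]) when m[p] ∈ forward and m[p+1] ∈ reverse, then skip 2, else step 1.
def pvALoop (forward_peaks reverse_peaks merged : List Int) (p : Nat) (acc : List (Int × Int)) : List (Int × Int) :=
  if h : p + 1 < merged.length then
    if merged[p]'(by omega) ∈ forward_peaks ∧ merged[p+1]'h ∈ reverse_peaks then
      pvALoop forward_peaks reverse_peaks merged (p+2) (acc ++ [(merged[p]'(by omega), merged[p+1]'h)])
    else
      pvALoop forward_peaks reverse_peaks merged (p+1) acc
  else acc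
termination_by merged.length - p

def calc_peak_pairs_single (forward_peaks : List Int) (reverse_peaks : List Int) : List (Int × Int) :=
  pvALoop forward_peaks reverse_peaks (PySem.List.sorted (forward_peaks ++ reverse_peaks) (fun x => x)) 0 []

-- ===== PORT B =====
-- Source B's inner while: first index ≥ j at which cond stops holding (end of the run).
def pvRunEnd (cond : List Bool) (j : Nat) : Nat :=
  if h : j < cond.length then
    if cond[j] then pvRunEnd cond (j+1) else j
  else j
termination_by cond.length - j

-- termination fact the outer loop cites: the run end is strictly past a true position
theorem pvRunEnd_ge (cond : List Bool) (j : Nat) : j ≤ pvRunEnd cond j := by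
  generalize hn : cond.length - j = n
  induction n generalizing j with
  | zero => rw [pvRunEnd, dif_neg (by omega)]
  | succ n ih =>
    rw [pvRunEnd]
    split
    · split
      · have := ih (j+1) (by omega); omega
      · omega
    · omega

theorem pvRunEnd_gt (cond : List Bool) (j : Nat) (h : j < cond.length) (hc : cond[j] = true) :
    j < pvRunEnd cond j := by
  rw [pvRunEnd, dif_pos h, if_pos hc]
  have := pvRunEnd_ge cond (j+1); omega

-- Source B's outer while over the cond list: on a true position, find the run end j and emit pairs at i, i+2, … < j.
def pvBLoop (merged : List Int) (cond : List Bool) (i : Nat) (pairs : List (Int × Int)) : List (Int × Int) :=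
  if h : i < cond.length then
    if hc : cond[i] then
      pvBLoop merged cond (pvRunEnd cond i)
        (pairs ++ (PySem.List.pyRange (i : Int) ((pvRunEnd cond i : Nat) : Int) 2).map
          (fun k => (PySem.List.pyGetD merged k 0, PySem.List.pyGetD merged (k+1) 0)))
    else pvBLoop merged cond (i+1) pairs
  else pairs
termination_by cond.length - i
decreasing_by
  · have := pvRunEnd_gt cond i h hc; omega
  · omega

def calc_peak_pairs_single_alt (forward_peaks : List Int) (reverse_peaks : List Int) : List (Int × Int) :=
  let merged := PySem.List.sorted (forward_peaks ++ reverse_peaks) (fun x => x)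
  let fs := PySem.Set.ofList forward_peaks
  let rs := PySem.Set.ofList reverse_peaks
  let cond := (merged.zip (PySem.List.slice merged (some 1) none)).map
      (fun ab => PySem.Set.contains fs ab.1 && PySem.Set.contains rs ab.2)
  pvBLoop merged cond 0 []

-- ===== PRECONDITION & SPEC =====
def Spec_calc_peak_pairs_single (forward_peaks : List Int) (reverse_peaks : List Int) (out : List (Int × Int)) : Prop := out = calc_peak_pairs_single_alt forward_peaks reverse_peaks
instance (forward_peaks : List Int) (reverse_peaks : List Int) (out : List (Int × Int)) : Decidable (Spec_calc_peak_pairs_single forward_peaks reverse_peaks out) := by unfold Spec_calc_peak_pairs_single; infer_instance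

-- ===== CLAIM (what is proved, stated in full; the proofs are below) =====
def Claim_equal_calc_peak_pairs_single : Prop := ∀ (forward_peaks : List Int) (reverse_peaks : List Int), Dom_calc_peak_pairs_single forward_peaks reverse_peaks → Spec_calc_peak_pairs_single forward_peaks reverse_peaks (calc_peak_pairs_single forward_peaks reverse_peaks)

-- ===== LEMMAS AND PROOFS =====

-- range(i, j, 2) splits off its head
theorem pvRangeTwoCons (a b : Int) (h : a < b) :
    PySem.List.pyRange a b 2 = a :: PySem.List.pyRange (a + 2) b 2 := by
  rw [PySem.List.pyRange_of_pos a b (by norm_num), PySem.List.pyRange_of_pos (a+2) b (by norm_num)]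
  have hn : (if a < b then ((b - a + 2 - 1) / 2).toNat else 0)
      = (if a + 2 < b then ((b - (a+2) + 2 - 1) / 2).toNat else 0) + 1 := by
    rw [if_pos h]
    by_cases h2 : a + 2 < b
    · rw [if_pos h2]
      omega
    · rw [if_neg h2]
      have : b - a + 2 - 1 = b - a + 1 := by ring
      rw [this]
      have hba : b - a = 1 ∨ b - a = 2 := by omega
      rcases hba with hba | hba <;> rw [hba] <;> decide
  rw [hn, List.range_succ_eq_map]
  simp only [List.map_cons, List.map_map]
  congr 1
  · norm_num
  · apply List.map_congr_left
    intro k _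
    simp only [Function.comp]
    push_cast
    ring

theorem pvRangeTwoNil (a b : Int) (h : b ≤ a) : PySem.List.pyRange a b 2 = [] := by
  rw [PySem.List.pyRange_of_pos a b (by norm_num), if_neg (by omega)]
  simp

-- A's loop over a maximal run of pairable positions [i, j): it pairs at i, i+2, … and ends up past the run.
theorem pvRunLemma (fwd rev merged : List Int) (cond : List Bool)
    (hlen : cond.length = merged.length - 1)
    (hcond : ∀ (k : Nat) (hk : k < cond.length),
      cond[k] = decide (merged[k]'(by omega) ∈ fwd ∧ merged[k+1]'(by omega) ∈ rev))
    (i j : Nat) (acc : List (Int × Int))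
    (hij : i ≤ j) (hjl : j ≤ cond.length)
    (hrun : ∀ (k : Nat) (hk : k < cond.length), i ≤ k → k < j → cond[k] = true)
    (hstop : j = cond.length ∨ ∃ (hj : j < cond.length), cond[j] = false) :
    pvALoop fwd rev merged i acc =
      pvALoop fwd rev merged j
        (acc ++ (PySem.List.pyRange (i : Int) (j : Int) 2).map
          (fun k => (PySem.List.pyGetD merged k 0, PySem.List.pyGetD merged (k+1) 0))) := by
  generalize hn : j - i = n
  induction n using Nat.strong_induction_on generalizing i acc with
  | _ n ih =>
    by_cases hii : i = j
    · subst hii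
      rw [pvRangeTwoNil _ _ (by omega)]
      simp
    · -- i < j, so cond[i] is true and A pairs at i
      have hij' : i < j := by omega
      have hi : i < cond.length := by omega
      have hi1 : i + 1 < merged.length := by omega
      have hci : cond[i] = true := hrun i hi (le_refl i) hij'
      have hprop : merged[i]'(by omega) ∈ fwd ∧ merged[i+1]'hi1 ∈ rev := by
        have := hcond i hi
        rw [hci] at this
        exact of_decide_eq_true this.symm
      rw [pvALoop, dif_pos hi1, if_pos hprop]
      rw [pvRangeTwoCons (i : Int) (j : Int) (by exact_mod_cast hij')]
      have hpair : (PySem.List.pyGetD merged (i : Int) 0, PySem.List.pyGetD merged ((i : Int) + 1) 0)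
          = (merged[i]'(by omega), merged[i+1]'hi1) := by
        have e1 : PySem.List.pyGetD merged (i : Int) 0 = merged[i]'(by omega) := by
          rw [PySem.List.pyGetD_natCast, List.getD_eq_getElem _ _ (by omega)]
        have e2 : PySem.List.pyGetD merged ((i : Int) + 1) 0 = merged[i+1]'hi1 := by
          have : (i : Int) + 1 = ((i + 1 : Nat) : Int) := by push_cast; ring
          rw [this, PySem.List.pyGetD_natCast, List.getD_eq_getElem _ _ (by omega)]
        rw [e1, e2]
      by_cases h2 : i + 2 ≤ j
      · -- still inside (or exactly at the end of) the run: recurse two further on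
        have := ih (j - (i+2)) (by omega) (i+2) (acc ++ [(merged[i]'(by omega), merged[i+1]'hi1)])
          (by omega) (by intro k hk hk1 hk2; exact hrun k hk (by omega) hk2) rfl
        rw [this]
        congr 1
        rw [List.map_cons, hpair]
        have hcast : ((i + 2 : Nat) : Int) = (i : Int) + 2 := by push_cast; ring
        rw [hcast]
        simp
      · -- j = i + 1: the pair consumed position j too; A at j would skip to j+1 anyway
        have hj : j = i + 1 := by omega
        subst hj
        rw [pvRangeTwoNil ((i : Int) + 2) (↑(i+1)) (by push_cast; omega)]
        rw [List.map_cons, List.map_nil, hpair]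
        -- show pvALoop (i+2) acc' = pvALoop (i+1) acc'
        rcases hstop with hstop | ⟨hjlt, hjf⟩
        · -- run ends at the list end: both indices are past the last pairable position
          conv_lhs => rw [pvALoop, dif_neg (by omega)]
          conv_rhs => rw [pvALoop, dif_neg (by omega)]
        · -- cond[i+1] = false: A at i+1 steps to i+2 without pairing
          have hj1 : i + 2 < merged.length := by omega
          have hnprop : ¬ (merged[i+1]'(by omega) ∈ fwd ∧ merged[i+2]'hj1 ∈ rev) := by
            have := hcond (i+1) hjlt
            rw [hjf] at this
            intro hcontra
            exact absurd (decide_eq_true hcontra) (by rw [← this]; simp)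
          conv_rhs => rw [pvALoop, dif_pos hj1, if_neg hnprop]

-- the run found by pvRunEnd is a maximal run of true positions
theorem pvRunEnd_le (cond : List Bool) (j : Nat) (h : j ≤ cond.length) :
    pvRunEnd cond j ≤ cond.length := by
  generalize hn : cond.length - j = n
  induction n generalizing j with
  | zero => rw [pvRunEnd, dif_neg (by omega)]; omega
  | succ n ih =>
    rw [pvRunEnd]
    split
    · split
      · exact ih (j+1) (by omega) (by omega)
      · omega
    · omega

theorem pvRunEnd_run (cond : List Bool) (i : Nat) :
    ∀ (k : Nat) (hk : k < cond.length), i ≤ k → k < pvRunEnd cond i → cond[k] = true := by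
  generalize hn : cond.length - i = n
  induction n generalizing i with
  | zero =>
    intro k hk h1 h2
    rw [pvRunEnd, dif_neg (by omega)] at h2
    omega
  | succ n ih =>
    intro k hk h1 h2
    rw [pvRunEnd] at h2
    by_cases hi : i < cond.length
    · rw [dif_pos hi] at h2
      by_cases hc : cond[i] = true
      · rw [if_pos hc] at h2
        by_cases hik : i = k
        · subst hik; exact hc
        · exact ih (i+1) (by omega) k hk (by omega) h2
      · rw [if_neg hc] at h2; omega
    · rw [dif_neg hi] at h2; omega

theorem pvRunEnd_stop (cond : List Bool) (i : Nat) (h : i ≤ cond.length) :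
    pvRunEnd cond i = cond.length ∨
      ∃ (hj : pvRunEnd cond i < cond.length), cond[pvRunEnd cond i] = false := by
  generalize hn : cond.length - i = n
  induction n generalizing i with
  | zero =>
    rw [pvRunEnd, dif_neg (by omega)]; left; omega
  | succ n ih =>
    rw [pvRunEnd]
    by_cases hi : i < cond.length
    · rw [dif_pos hi]
      by_cases hc : cond[i] = true
      · rw [if_pos hc]; exact ih (i+1) (by omega) (by omega)
      · rw [if_neg hc]
        right
        exact ⟨hi, by simpa using hc⟩
    · rw [dif_neg hi]; left; omega

-- main equivalence of the two loops, for any cond list matching the pairability predicate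
theorem pvMain (fwd rev merged : List Int) (cond : List Bool)
    (hlen : cond.length = merged.length - 1)
    (hcond : ∀ (k : Nat) (hk : k < cond.length),
      cond[k] = decide (merged[k]'(by omega) ∈ fwd ∧ merged[k+1]'(by omega) ∈ rev))
    (i : Nat) (acc : List (Int × Int)) :
    pvBLoop merged cond i acc = pvALoop fwd rev merged i acc := by
  generalize hn : cond.length - i = n
  induction n using Nat.strong_induction_on generalizing i acc with
  | _ n ih =>
    rw [pvBLoop]
    by_cases hi : i < cond.length
    · rw [dif_pos hi]
      by_cases hc : cond[i] = true
      · rw [dif_pos hc]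
        have hgt := pvRunEnd_gt cond i hi hc
        have hle := pvRunEnd_le cond i (by omega)
        rw [ih (cond.length - pvRunEnd cond i) (by omega) (pvRunEnd cond i) _ rfl]
        rw [pvRunLemma fwd rev merged cond hlen hcond i (pvRunEnd cond i) acc (by omega) hle
          (pvRunEnd_run cond i) (pvRunEnd_stop cond i (by omega))]
      · rw [dif_neg hc]
        rw [ih (cond.length - (i+1)) (by omega) (i+1) acc rfl]
        have hi1 : i + 1 < merged.length := by omega
        have hnprop : ¬ (merged[i]'(by omega) ∈ fwd ∧ merged[i+1]'hi1 ∈ rev) := by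
          have := hcond i hi
          intro hcontra
          apply hc
          rw [this]
          exact decide_eq_true hcontra
        conv_rhs => rw [pvALoop, dif_pos hi1, if_neg hnprop]
    · rw [dif_neg hi]
      rw [pvALoop, dif_neg (by omega)]

-- ===== VERDICT (by name: the statement is the Claim_ definition above) =====
theorem calc_peak_pairs_single_spec : Claim_equal_calc_peak_pairs_single := by
  intro fwd rev _
  unfold Spec_calc_peak_pairs_single calc_peak_pairs_single calc_peak_pairs_single_alt
  simp only []
  set merged := PySem.List.sorted (fwd ++ rev) (fun x => x) with hm
  have hslice : PySem.List.slice merged (some 1) none = merged.tail :=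
    PySem.List.slice_from_one merged
  rw [hslice]
  rw [pvMain fwd rev merged _ ?_ ?_ 0 []]
  · simp [List.length_zip]
  · intro k hk
    simp only [List.getElem_map]
    have hk' : k + 1 < merged.length := by
      simp [List.length_zip] at hk; omega
    rw [List.getElem_zip, List.getElem_tail]
    simp [pysem]
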